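-- pv_equiv track=rewrite | github.com/Kimyechan/codingTestPractice | programmers/graph/방의 개수.py | solution
-- ===== SOURCE A (Python) =====
-- from collections import deque
-- from collections import defaultdict
--
-- def solution(arrows):
--     answer = 0
--     mX = [0, 1, 1, 1, 0, -1, -1, -1]
--     mY = [1, 1, 0, -1, -1, -1, 0, 1]
--
--     vertex = defaultdict(int)
--     edge = defaultdict(int)
--     q = deque([[0, 0]])
--     x, y = 0, 0
--
--     # 홀수 길이 일 때 X 자로 만나면 X 교차점이 정점으로 나타나지 않아서 카운트가 되지 않는다
--     # 전체 이동을 2배 늘려준다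
--     for arrow in arrows:
--         for _ in range(2):
--             nx = x + mX[arrow]
--             ny = y + mY[arrow]
--             q.append([nx, ny])
--             x, y = nx, ny
--
--     x, y = q.popleft()
--     vertex[(x, y)] = 1
--
--     # 도달 정점이 이미 지난 정점이고
--     # 만들어지는 간선이 새로운 간선이면 하나의 공간이 만들어진다
--     while q:
--         nx, ny = q.popleft()
--
--         if vertex[(nx, ny)] == 1:
--             if edge[(x, y, nx, ny)] == 0:
--                 answer += 1
--
--         vertex[(nx, ny)] = 1
--         edge[(x, y, nx, ny)] = 1
--         edge[(nx, ny, x, y)] = 1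
--
--         x, y = nx, ny
--     return answer
-- ===== SOURCE B (Python) =====
-- def solution(arrows):
--     # Euler formula for one connected walk: rooms = edges - vertices + 1.
--     dirs = [(0, 1), (1, 1), (1, 0), (1, -1), (0, -1), (-1, -1), (-1, 0), (-1, 1)]
--     pos = (0, 0)
--     vertices = {pos}
--     edges = set()
--     for a in arrows:
--         d = dirs[a]
--         for _ in range(2):
--             nxt = (pos[0] + d[0], pos[1] + d[1])
--             vertices.add(nxt)
--             edges.add((min(pos, nxt), max(pos, nxt)))
--             pos = nxt
--     return len(edges) - len(vertices) + 1
-- ===== Notes on version B (the rewrite author's own statement) =====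
-- stated objective: simpler
-- what changed: Instead of A's per-step cycle detection (increment on reaching an already-visited vertex via a new edge, tracked in two defaultdicts over a pre-built doubled move queue), B makes one pass collecting the vertex set and the undirected edge set and returns len(edges) - len(vertices) + 1, the Euler formula for the single connected walk.
import Mathlib
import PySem

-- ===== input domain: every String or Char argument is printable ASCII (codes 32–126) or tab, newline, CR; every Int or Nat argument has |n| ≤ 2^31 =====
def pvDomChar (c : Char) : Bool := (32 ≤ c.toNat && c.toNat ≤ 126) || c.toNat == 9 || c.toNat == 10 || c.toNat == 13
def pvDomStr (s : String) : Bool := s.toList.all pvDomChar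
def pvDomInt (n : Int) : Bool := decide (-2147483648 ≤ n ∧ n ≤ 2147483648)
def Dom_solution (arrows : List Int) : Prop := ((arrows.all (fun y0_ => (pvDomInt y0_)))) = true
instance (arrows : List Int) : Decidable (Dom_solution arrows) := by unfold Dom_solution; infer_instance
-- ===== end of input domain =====

-- B replaces A's per-step cycle detection by a single pass collecting vertex/edge sets
-- and returning len(edges) - len(vertices) + 1 (Euler formula for one connected walk); objective: simpler.


-- ===== PORT A =====
def mX_A : List Int := [0, 1, 1, 1, 0, -1, -1, -1]
def mY_A : List Int := [1, 1, 0, -1, -1, -1, 0, 1]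

-- one iteration of A's while loop: state (answer, vertex dict, edge dict, x, y)
def stepA (st : Int × PySem.Dict (Int × Int) Int × PySem.Dict (Int × Int × Int × Int) Int × Int × Int)
    (p : Int × Int) :
    Int × PySem.Dict (Int × Int) Int × PySem.Dict (Int × Int × Int × Int) Int × Int × Int :=
  let (ans, vtx, edg, x, y) := st
  let ans := if vtx.getD (p.1, p.2) 0 = 1 ∧ edg.getD (x, y, p.1, p.2) 0 = 0 then ans + 1 else ans
  let vtx := vtx.insert (p.1, p.2) 1
  let edg := (edg.insert (x, y, p.1, p.2) 1).insert (p.1, p.2, x, y) 1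
  (ans, vtx, edg, p.1, p.2)

def solution (arrows : List Int) : Int :=
  -- build q: starts at [(0,0)], each arrow appends two positions (pyGetD's default is dead under Pre_)
  let build := arrows.foldl
    (fun (st : List (Int × Int) × Int × Int) arrow =>
      let (q, x, y) := st
      let nx := x + PySem.List.pyGetD mX_A arrow 0
      let ny := y + PySem.List.pyGetD mY_A arrow 0
      let nx2 := nx + PySem.List.pyGetD mX_A arrow 0
      let ny2 := ny + PySem.List.pyGetD mY_A arrow 0
      (q ++ [(nx, ny)] ++ [(nx2, ny2)], nx2, ny2))
    ([(0, 0)], 0, 0)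
  match build.1 with
  | [] => 0  -- unreachable: q always starts with (0,0)
  | (x0, y0) :: rest =>
    let vtx : PySem.Dict (Int × Int) Int := (PySem.Dict.empty).insert (x0, y0) 1
    let fin := rest.foldl stepA (0, vtx, PySem.Dict.empty, x0, y0)
    fin.1

-- ===== PORT B =====
def dirsB : List (Int × Int) := [(0, 1), (1, 1), (1, 0), (1, -1), (0, -1), (-1, -1), (-1, 0), (-1, 1)]

-- (min(p,q), max(p,q)) under Python tuple order
def pvKey (p q : Int × Int) : (Int × Int) × (Int × Int) :=
  if p.1 < q.1 ∨ (p.1 = q.1 ∧ p.2 ≤ q.2) then (p, q) else (q, p)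

-- one unit step of B: state (vertices, edges, pos)
def stepB (st : PySem.Set (Int × Int) × PySem.Set ((Int × Int) × (Int × Int)) × (Int × Int))
    (q : Int × Int) :
    PySem.Set (Int × Int) × PySem.Set ((Int × Int) × (Int × Int)) × (Int × Int) :=
  let (V, E, pos) := st
  (PySem.Set.add V q, PySem.Set.add E (pvKey pos q), q)

def solution_alt (arrows : List Int) : Int :=
  let fin := arrows.foldl
    (fun (st : PySem.Set (Int × Int) × PySem.Set ((Int × Int) × (Int × Int)) × (Int × Int)) a =>
      let d := PySem.List.pyGetD dirsB a ((0 : Int), (0 : Int))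
      let st := stepB st (st.2.2.1 + d.1, st.2.2.2 + d.2)
      stepB st (st.2.2.1 + d.1, st.2.2.2 + d.2))
    (PySem.Set.ofList [(0, 0)], PySem.Set.empty, ((0 : Int), (0 : Int)))
  (fin.2.1.length : Int) - (fin.1.length : Int) + 1

-- ===== PRECONDITION & SPEC =====
-- Pre_ excludes exactly the arrows on which Python A raises IndexError (index outside [-8,8) on the length-8 direction tables).
def Pre_solution (arrows : List Int) : Prop := ∀ a ∈ arrows, -8 ≤ a ∧ a < 8
instance (arrows : List Int) : Decidable (Pre_solution arrows) := by unfold Pre_solution; infer_instance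
def pvWitness_solution : List Int := [6, 6, 6, 4, 4, 4, 2, 2, 2, 0, 0, 0]

def Spec_solution (arrows : List Int) (out : Int) : Prop := out = solution_alt arrows
instance (arrows : List Int) (out : Int) : Decidable (Spec_solution arrows out) := by unfold Spec_solution; infer_instance

-- ===== CLAIM (what is proved, stated in full; the proofs are below) =====
def Claim_equal_solution : Prop := ∀ (arrows : List Int), Dom_solution arrows → Pre_solution arrows → Spec_solution arrows (solution arrows)

-- ===== LEMMAS AND PROOFS =====

-- the list of positions the doubled walk visits, two per arrow, using B's direction table
def pvSteps (arrows : List Int) (p : Int × Int) : List (Int × Int) :=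
  match arrows with
  | [] => []
  | a :: rest =>
    let d := PySem.List.pyGetD dirsB a ((0 : Int), (0 : Int))
    let p1 := (p.1 + d.1, p.2 + d.2)
    let p2 := (p1.1 + d.1, p1.2 + d.2)
    p1 :: p2 :: pvSteps rest p2

-- A's two tables agree with B's table on every in-range arrow
lemma delta_eq (a : Int) (h : -8 ≤ a ∧ a < 8) :
    (PySem.List.pyGetD mX_A a 0, PySem.List.pyGetD mY_A a 0)
      = PySem.List.pyGetD dirsB a ((0 : Int), (0 : Int)) := by
  obtain ⟨h1, h2⟩ := h
  interval_cases a <;> decide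

lemma buildA_eq (arrows : List Int) (h : ∀ a ∈ arrows, -8 ≤ a ∧ a < 8) (q0 : List (Int × Int)) (x y : Int) :
    arrows.foldl
      (fun (st : List (Int × Int) × Int × Int) arrow =>
        let (q, x, y) := st
        let nx := x + PySem.List.pyGetD mX_A arrow 0
        let ny := y + PySem.List.pyGetD mY_A arrow 0
        let nx2 := nx + PySem.List.pyGetD mX_A arrow 0
        let ny2 := ny + PySem.List.pyGetD mY_A arrow 0
        (q ++ [(nx, ny)] ++ [(nx2, ny2)], nx2, ny2))
      (q0, x, y)
    = (q0 ++ pvSteps arrows (x, y), ((pvSteps arrows (x, y)).getLastD (x, y)).1,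
        ((pvSteps arrows (x, y)).getLastD (x, y)).2) := by
  induction arrows generalizing q0 x y with
  | nil => simp [pvSteps]
  | cons a rest ih =>
    have hd := delta_eq a (h a (by simp))
    have hx : PySem.List.pyGetD mX_A a 0 = (PySem.List.pyGetD dirsB a ((0 : Int), (0 : Int))).1 := by
      rw [← hd]
    have hy : PySem.List.pyGetD mY_A a 0 = (PySem.List.pyGetD dirsB a ((0 : Int), (0 : Int))).2 := by
      rw [← hd]
    simp only [List.foldl_cons, pvSteps, hx, hy]
    rw [ih (fun b hb => h b (by simp [hb]))]
    simp [-List.getLastD_eq_getLast?, List.getLastD_cons]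

-- B's fold over arrows is the fold of stepB over the step list
lemma foldB_eq (arrows : List Int)
    (st : PySem.Set (Int × Int) × PySem.Set ((Int × Int) × (Int × Int)) × (Int × Int)) :
    arrows.foldl
      (fun st a =>
        let d := PySem.List.pyGetD dirsB a ((0 : Int), (0 : Int))
        let st := stepB st (st.2.2.1 + d.1, st.2.2.2 + d.2)
        stepB st (st.2.2.1 + d.1, st.2.2.2 + d.2))
      st
    = (pvSteps arrows st.2.2).foldl stepB st := by
  induction arrows generalizing st with
  | nil => rfl
  | cons a rest ih =>
    obtain ⟨V, E, pos⟩ := st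
    simp only [List.foldl_cons, pvSteps]
    rw [ih]
    rfl

-- the coupling invariant between A's state and B's state
def pvInv (ans : Int) (vtx : PySem.Dict (Int × Int) Int)
    (edg : PySem.Dict (Int × Int × Int × Int) Int) (x y : Int)
    (V : PySem.Set (Int × Int)) (E : PySem.Set ((Int × Int) × (Int × Int))) (pos : Int × Int) : Prop :=
  (x, y) = pos ∧
  ans = (E.length : Int) - (V.length : Int) + 1 ∧
  (∀ v : Int × Int, vtx.getD v 0 = if v ∈ V then 1 else 0) ∧
  (∀ u w : Int × Int, edg.getD (u.1, u.2, w.1, w.2) 0 = if pvKey u w ∈ E then 1 else 0) ∧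
  (∀ e ∈ E, e.1 ∈ V ∧ e.2 ∈ V) ∧
  pos ∈ V

lemma pvKey_cases (p q : Int × Int) : pvKey p q = (p, q) ∨ pvKey p q = (q, p) := by
  unfold pvKey; split_ifs <;> simp

lemma pvKey_eq_iff (u w p q : Int × Int) :
    pvKey u w = pvKey p q ↔ (u = p ∧ w = q) ∨ (u = q ∧ w = p) := by
  obtain ⟨a, b⟩ := u; obtain ⟨c, d⟩ := w; obtain ⟨e, f⟩ := p; obtain ⟨g, k⟩ := q
  unfold pvKey
  split_ifs <;> simp [Prod.ext_iff] <;> omega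

lemma inv_step (ans : Int) (vtx : PySem.Dict (Int × Int) Int) (edg : PySem.Dict (Int × Int × Int × Int) Int) (x y : Int) (V : PySem.Set (Int × Int)) (E : PySem.Set ((Int × Int) × (Int × Int))) (pos q : Int × Int)
    (h : pvInv ans vtx edg x y V E pos) :
    pvInv (stepA (ans, vtx, edg, x, y) q).1
        (stepA (ans, vtx, edg, x, y) q).2.1
        (stepA (ans, vtx, edg, x, y) q).2.2.1
        (stepA (ans, vtx, edg, x, y) q).2.2.2.1
        (stepA (ans, vtx, edg, x, y) q).2.2.2.2
        (stepB (V, E, pos) q).1 (stepB (V, E, pos) q).2.1 (stepB (V, E, pos) q).2.2 := by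
  obtain ⟨hpos, hans, hvtx, hedg, hE, hpV⟩ := h
  subst hpos
  simp only [stepA, stepB, pvInv, Prod.mk.eta]
  have hvq := hvtx q
  have heq := hedg (x, y) q
  refine ⟨by trivial, ?_, ?_, ?_, ?_, ?_⟩
  · -- the count matches the Euler formula
    by_cases hq : q ∈ V
    · by_cases hk : pvKey (x, y) q ∈ E
      · rw [if_neg (by simp [hvq, heq, hq, hk]), PySem.Set.add_of_mem hq, PySem.Set.add_of_mem hk]
        exact hans
      · rw [if_pos (by simp [hvq, heq, hq, hk]), PySem.Set.add_of_mem hq,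
          PySem.Set.add_of_not_mem hk]
        simp only [List.length_append, List.length_cons, List.length_nil]
        push_cast
        omega
    · have hk : pvKey (x, y) q ∉ E := by
        intro hk
        have h2 := hE _ hk
        rcases pvKey_cases (x, y) q with hc | hc <;> rw [hc] at h2 <;>
          first
          | exact hq h2.2
          | exact hq h2.1
      rw [if_neg (by simp [hvq, hq]), PySem.Set.add_of_not_mem hq, PySem.Set.add_of_not_mem hk]
      simp only [List.length_append, List.length_cons, List.length_nil]
      push_cast
      omega
  · -- vertex dict tracks the vertex set
    intro v
    rw [PySem.Dict.getD_insert, hvtx v]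
    by_cases hv : v = q <;> simp [hv, PySem.Set.mem_add]
  · -- edge dict (both directions) tracks the undirected edge set
    intro u w
    have h1 : ((u.1, u.2, w.1, w.2) = ((q.1, q.2, x, y) : Int × Int × Int × Int)) ↔
        (u = q ∧ w = (x, y)) := by
      simp [Prod.ext_iff, and_assoc]
    have h2 : ((u.1, u.2, w.1, w.2) = ((x, y, q.1, q.2) : Int × Int × Int × Int)) ↔
        (u = (x, y) ∧ w = q) := by
      simp [Prod.ext_iff, and_assoc]
    have h3 : pvKey u w ∈ PySem.Set.add E (pvKey (x, y) q) ↔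
        pvKey u w ∈ E ∨ (u = (x, y) ∧ w = q) ∨ (u = q ∧ w = (x, y)) := by
      rw [PySem.Set.mem_add, pvKey_eq_iff]
    simp only [PySem.Dict.getD_insert, hedg u w, h1, h2, h3]
    by_cases e1 : u = q ∧ w = (x, y) <;> by_cases e2 : u = (x, y) ∧ w = q <;>
      by_cases e3 : pvKey u w ∈ E <;> simp [e1, e2, e3]
  · -- every edge endpoint is a vertex
    intro e he
    rw [PySem.Set.mem_add] at he
    rcases he with he | he
    · have := hE e he
      exact ⟨by rw [PySem.Set.mem_add]; exact Or.inl this.1,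
             by rw [PySem.Set.mem_add]; exact Or.inl this.2⟩
    · subst he
      rcases pvKey_cases (x, y) q with hc | hc <;> rw [hc] <;>
        simp [PySem.Set.mem_add, hpV]
  · -- the current position is a vertex
    rw [PySem.Set.mem_add]
    exact Or.inr rfl

lemma inv_foldl (ps : List (Int × Int)) :
    ∀ ans vtx edg x y V E pos, pvInv ans vtx edg x y V E pos →
    pvInv (ps.foldl stepA (ans, vtx, edg, x, y)).1
        (ps.foldl stepA (ans, vtx, edg, x, y)).2.1
        (ps.foldl stepA (ans, vtx, edg, x, y)).2.2.1
        (ps.foldl stepA (ans, vtx, edg, x, y)).2.2.2.1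
        (ps.foldl stepA (ans, vtx, edg, x, y)).2.2.2.2
        (ps.foldl stepB (V, E, pos)).1 (ps.foldl stepB (V, E, pos)).2.1
        (ps.foldl stepB (V, E, pos)).2.2 := by
  induction ps with
  | nil => intro ans vtx edg x y V E pos h; exact h
  | cons q ps ih =>
    intro ans vtx edg x y V E pos h
    have h' := inv_step ans vtx edg x y V E pos q h
    simpa [List.foldl_cons] using
      ih _ _ _ _ _ _ _ _ h'

-- ===== VERDICT (by name: the statement is the Claim_ definition above) =====
theorem solution_spec : Claim_equal_solution := by
  intro arrows _ hpre
  unfold Spec_solution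
  have h0 : pvInv 0 ((PySem.Dict.empty).insert ((0 : Int), (0 : Int)) 1) PySem.Dict.empty 0 0
      [((0 : Int), (0 : Int))] PySem.Set.empty ((0 : Int), (0 : Int)) := by
    refine ⟨rfl, by simp [PySem.Set.empty], ?_, ?_, ?_, by simp⟩
    · intro v
      rw [PySem.Dict.getD_insert]
      by_cases hv : v = ((0 : Int), (0 : Int)) <;> simp [hv]
    · intro u w
      simp [PySem.Set.empty]
    · intro e he
      simp [PySem.Set.empty] at he
  have hmain := inv_foldl (pvSteps arrows ((0 : Int), (0 : Int))) 0 _ _ 0 0 _ _ _ h0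
  have hA : solution arrows = ((pvSteps arrows ((0 : Int), (0 : Int))).foldl stepA
      (0, (PySem.Dict.empty).insert ((0 : Int), (0 : Int)) 1, PySem.Dict.empty, 0, 0)).1 := by
    simp only [solution]
    rw [buildA_eq arrows hpre [((0 : Int), (0 : Int))] 0 0]
    simp
  have hofl : PySem.Set.ofList [((0 : Int), (0 : Int))] = [((0 : Int), (0 : Int))] := by decide
  have hB : solution_alt arrows =
      (((pvSteps arrows ((0 : Int), (0 : Int))).foldl stepB
        ([((0 : Int), (0 : Int))], PySem.Set.empty, ((0 : Int), (0 : Int)))).2.1.length : Int) -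
      (((pvSteps arrows ((0 : Int), (0 : Int))).foldl stepB
        ([((0 : Int), (0 : Int))], PySem.Set.empty, ((0 : Int), (0 : Int)))).1.length : Int) + 1 := by
    simp only [solution_alt, hofl]
    rw [foldB_eq arrows ([((0 : Int), (0 : Int))], PySem.Set.empty, ((0 : Int), (0 : Int)))]
  rw [hA, hB]
  exact hmain.2.1
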